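-- pv_equiv track=rewrite | github.com/elroi773/Coding-Test | 프로그래머스/3/214288. 상담원 인원/상담원 인원.py | solution
-- ===== SOURCE A (Python) =====
-- import heapq
--
-- def calc_wait(req_list, m):
--     """req_list: [(start, duration), ...] sorted by start"""
--     if not req_list:
--         return 0
--
--     heap = []  # end times of ongoing consultations
--     total_wait = 0
--
--     for a, b in req_list:
--         if len(heap) < m:
--             # free mentor available
--             heapq.heappush(heap, a + b)
--         else:
--             earliest_end = heapq.heappop(heap)
--             start_time = max(a, earliest_end)
--             total_wait += start_time - a
--             heapq.heappush(heap, start_time + b)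
--
--     return total_wait
--
-- def solution(k, n, reqs):
--     # 1) split requests by type
--     by_type = [[] for _ in range(k + 1)]
--     for a, b, c in reqs:
--         by_type[c].append((a, b))
--
--     # 2) precompute cost[type][mentors]
--     # cost[t][m] for m=1..n
--     cost = [[0] * (n + 1) for _ in range(k + 1)]
--     for t in range(1, k + 1):
--         for m in range(1, n + 1):
--             cost[t][m] = calc_wait(by_type[t], m)
--
--     # 3) DP: dp[i][j] = min wait using j mentors for first i types
--     INF = 10**18
--     dp = [[INF] * (n + 1) for _ in range(k + 1)]
--     dp[0][0] = 0
--
--     for i in range(1, k + 1):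
--         # need at least i mentors to give >=1 to each of i types
--         for j in range(i, n + 1):
--             # allocate m mentors to type i (at least 1)
--             # remaining j-m must be >= i-1
--             max_m = j - (i - 1)
--             for m in range(1, max_m + 1):
--                 dp[i][j] = min(dp[i][j], dp[i - 1][j - m] + cost[i][m])
--
--     return dp[k][n]
-- ===== SOURCE B (Python) =====
-- import heapq
--
-- def solution(k, n, reqs):
--     # Combine per-type cost vectors by divide-and-conquer min-plus convolution
--     # (associative, so any combine order yields the optimal allocation's wait).
--     INF = 10**18
--
--     buckets = [[] for _ in range(k + 1)]
--     for a, b, c in reqs: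
--         buckets[c].append((a, b))
--
--     def wait(rl, m):
--         heap = []  # end times of ongoing consultations
--         total = 0
--         for a, b in rl:
--             if len(heap) < m:
--                 heapq.heappush(heap, a + b)
--             else:
--                 e = heapq.heappop(heap)
--                 s = max(a, e)
--                 total += s - a
--                 heapq.heappush(heap, s + b)
--         return total
--
--     def minplus(u, v):
--         def best(s):
--             b = INF
--             for i in range(s + 1):
--                 b = min(b, u[i] + v[s - i])
--             return b
--         return [best(s) for s in range(n + 1)]
--
--     unit = [0] + [INF] * n
--     vecs = [unit] + [[INF] + [wait(buckets[t], m) for m in range(1, n + 1)]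
--                      for t in range(1, k + 1)]
--
--     def reduce_dc(vs):
--         if len(vs) == 1:
--             return vs[0]
--         mid = len(vs) // 2
--         return minplus(reduce_dc(vs[:mid]), reduce_dc(vs[mid:]))
--
--     return reduce_dc(vecs)[n]
-- ===== Notes on version B (the rewrite author's own statement) =====
-- stated objective: alternative
-- what changed: Replaces A's 3-nested-loop prefix knapsack DP over a 2-D table with a divide-and-conquer reduction that min-plus-convolves per-type cost vectors (the convolution is associative, so the pairing order is irrelevant and the result is the same optimal allocation value).
import Mathlib
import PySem

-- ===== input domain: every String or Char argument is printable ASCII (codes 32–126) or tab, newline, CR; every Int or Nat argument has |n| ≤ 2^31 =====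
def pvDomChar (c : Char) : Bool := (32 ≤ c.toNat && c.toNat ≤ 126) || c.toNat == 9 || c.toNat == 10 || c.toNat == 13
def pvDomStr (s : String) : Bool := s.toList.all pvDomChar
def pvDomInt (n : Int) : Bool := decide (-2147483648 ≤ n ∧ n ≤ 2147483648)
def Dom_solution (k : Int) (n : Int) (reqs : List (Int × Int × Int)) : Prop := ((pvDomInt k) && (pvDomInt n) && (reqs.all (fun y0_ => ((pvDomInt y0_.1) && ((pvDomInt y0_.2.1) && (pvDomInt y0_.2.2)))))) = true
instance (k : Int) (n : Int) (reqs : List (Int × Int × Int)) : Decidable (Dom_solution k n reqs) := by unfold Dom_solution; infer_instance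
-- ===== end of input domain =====

-- B replaces A's full cost matrix + 3-nested-loop prefix knapsack over a 2-D table by a
-- divide-and-conquer reduction that min-plus-convolves per-type cost vectors (the
-- convolution is associative, so the pairing order does not change the optimum).

def pvINF : Int := 10 ^ 18

-- ===== PORT A =====
-- heapq is modeled as a sorted list: heappush = ordered insert, heappop = head (the
-- minimum) — exact for what this program observes (the sequence of popped minima).
def pvInsort (x : Int) : List Int → List Int
  | [] => [x]
  | y :: ys => if x ≤ y then x :: y :: ys else y :: pvInsort x ys

def calcWaitA (reqList : List (Int × Int)) (m : Int) : Int :=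
  if reqList = [] then 0
  else
    (reqList.foldl
      (fun (st : List Int × Int) ab =>
        if PySem.List.len st.1 < m then
          (pvInsort (ab.1 + ab.2) st.1, st.2)
        else
          match st.1 with
          | [] => st  -- unreachable: every call passes m ≥ 1 (Python would raise IndexError)
          | e :: rest =>
            let s := max ab.1 e
            (pvInsort (s + ab.2) rest, st.2 + (s - ab.1)))
      ([], 0)).2

-- tbl[i][j] reads / writes; indices are nonnegative and in range on every input
-- admitted by Pre_solution (exact there).
def pvTblGet (tbl : List (List Int)) (i j : Int) : Int :=
  PySem.List.pyGetD (PySem.List.pyGetD tbl i []) j 0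

def pvTblSet (tbl : List (List Int)) (i j : Int) (v : Int) : List (List Int) :=
  PySem.List.pySetD tbl i (PySem.List.pySetD (PySem.List.pyGetD tbl i []) j v)

def solution (k : Int) (n : Int) (reqs : List (Int × Int × Int)) : Int :=
  let byType : List (List (Int × Int)) :=
    reqs.foldl
      (fun bt r => PySem.List.pySetD bt r.2.2 (PySem.List.pyGetD bt r.2.2 [] ++ [(r.1, r.2.1)]))
      ((PySem.List.pyRange 0 (k + 1) 1).map (fun _ => []))
  let cost : List (List Int) :=
    (PySem.List.pyRange 1 (k + 1) 1).foldl
      (fun cost t =>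
        (PySem.List.pyRange 1 (n + 1) 1).foldl
          (fun cost m => pvTblSet cost t m (calcWaitA (PySem.List.pyGetD byType t []) m))
          cost)
      ((PySem.List.pyRange 0 (k + 1) 1).map (fun _ => List.replicate (n + 1).toNat 0))
  let dp0 : List (List Int) :=
    pvTblSet ((PySem.List.pyRange 0 (k + 1) 1).map (fun _ => List.replicate (n + 1).toNat pvINF)) 0 0 0
  let dp : List (List Int) :=
    (PySem.List.pyRange 1 (k + 1) 1).foldl
      (fun dp i =>
        (PySem.List.pyRange i (n + 1) 1).foldl
          (fun dp j =>
            (PySem.List.pyRange 1 (j - (i - 1) + 1) 1).foldl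
              (fun dp m =>
                pvTblSet dp i j (min (pvTblGet dp i j) (pvTblGet dp (i - 1) (j - m) + pvTblGet cost i m)))
              dp)
          dp)
      dp0
  pvTblGet dp k n

-- ===== PORT B =====
def calcWaitB (reqList : List (Int × Int)) (m : Int) : Int :=
  (reqList.foldl
    (fun (st : List Int × Int) ab =>
      if PySem.List.len st.1 < m then
        (pvInsort (ab.1 + ab.2) st.1, st.2)
      else
        match st.1 with
        | [] => st  -- unreachable: every call passes m ≥ 1 (Python would raise IndexError)
        | e :: rest =>
          let s := max ab.1 e
          (pvInsort (s + ab.2) rest, st.2 + (s - ab.1)))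
    ([], 0)).2

-- minplus(u, v): out[s] = running min over i of u[i] + v[s-i] (indices in range on every use)
def pvMinplusB (n : Int) (u v : List Int) : List Int :=
  (PySem.List.pyRange 0 (n + 1) 1).map (fun s =>
    (PySem.List.pyRange 0 (s + 1) 1).foldl
      (fun b i => min b (PySem.List.pyGetD u i 0 + PySem.List.pyGetD v (s - i) 0)) pvINF)

-- [INF] + [wait(rl, m) for m in range(1, n+1)]
def pvVecB (n : Int) (rl : List (Int × Int)) : List Int :=
  [pvINF] ++ (PySem.List.pyRange 1 (n + 1) 1).map (fun m => calcWaitB rl m)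

def pvDcReduce (n : Int) (vs : List (List Int)) : List Int :=
  if vs.length ≤ 1 then vs.headD []
  else
    pvMinplusB n (pvDcReduce n (vs.take (vs.length / 2))) (pvDcReduce n (vs.drop (vs.length / 2)))
termination_by vs.length
decreasing_by
  · simp only [List.length_take]; omega
  · simp only [List.length_drop]; omega

def solution_alt (k : Int) (n : Int) (reqs : List (Int × Int × Int)) : Int :=
  let buckets : List (List (Int × Int)) :=
    reqs.foldl
      (fun bt r => PySem.List.pySetD bt r.2.2 (PySem.List.pyGetD bt r.2.2 [] ++ [(r.1, r.2.1)]))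
      ((PySem.List.pyRange 0 (k + 1) 1).map (fun _ => []))
  let unit : List Int := [(0 : Int)] ++ List.replicate n.toNat pvINF
  let vecs : List (List Int) :=
    [unit] ++ (PySem.List.pyRange 1 (k + 1) 1).map
      (fun t => pvVecB n (PySem.List.pyGetD buckets t []))
  PySem.List.pyGetD (pvDcReduce n vecs) n 0

-- ===== PRECONDITION & SPEC =====
-- Pre_solution excludes exactly the inputs on which A raises: negative k or n (IndexError
-- writing dp[0][0]) and request type ids outside -(k+1)..k (IndexError on by_type[c]).
def Pre_solution (k : Int) (n : Int) (reqs : List (Int × Int × Int)) : Prop :=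
  0 ≤ k ∧ 0 ≤ n ∧ ∀ r ∈ reqs, -(k + 1) ≤ r.2.2 ∧ r.2.2 ≤ k

instance (k : Int) (n : Int) (reqs : List (Int × Int × Int)) : Decidable (Pre_solution k n reqs) := by
  unfold Pre_solution; infer_instance

def pvWitness_solution : Int × Int × (List (Int × Int × Int)) :=
  (2, 3, [(0, 2, 1), (1, 2, 1), (0, 3, 2)])

def Spec_solution (k : Int) (n : Int) (reqs : List (Int × Int × Int)) (out : Int) : Prop := out = solution_alt k n reqs
instance (k : Int) (n : Int) (reqs : List (Int × Int × Int)) (out : Int) : Decidable (Spec_solution k n reqs out) := by unfold Spec_solution; infer_instance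

-- ===== CLAIM (what is proved, stated in full; the proofs are below) =====
def Claim_equal_solution : Prop := ∀ (k : Int) (n : Int) (reqs : List (Int × Int × Int)), Dom_solution k n reqs → Pre_solution k n reqs → Spec_solution k n reqs (solution k n reqs)

-- ===== LEMMAS AND PROOFS =====

-- math layer
def bigMin (l : List Int) : Int := l.foldl min pvINF

lemma foldl_min_le_init (l : List Int) (a : Int) : l.foldl min a ≤ a := by
  induction l generalizing a with
  | nil => simp
  | cons x xs ih => exact le_trans (ih _) (min_le_left _ _)

lemma foldl_min_min (l : List Int) (a b : Int) :
    l.foldl min (min a b) = min a (l.foldl min b) := by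
  induction l generalizing b with
  | nil => rfl
  | cons x xs ih => simpa [min_assoc] using ih (min b x)

lemma bigMin_le_INF (l : List Int) : bigMin l ≤ pvINF := foldl_min_le_init l _

lemma bigMin_cons (x : Int) (l : List Int) : bigMin (x :: l) = min x (bigMin l) := by
  simp only [bigMin, List.foldl_cons]
  rw [min_comm pvINF x, foldl_min_min]

lemma bigMin_le_of_mem {l : List Int} {x : Int} (h : x ∈ l) : bigMin l ≤ x := by
  induction l with
  | nil => cases h
  | cons y ys ih =>
    rw [bigMin_cons]
    rcases List.mem_cons.1 h with rfl | h'
    · exact min_le_left _ _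
    · exact le_trans (min_le_right _ _) (ih h')

lemma le_bigMin {l : List Int} {a : Int} (h1 : a ≤ pvINF) (h2 : ∀ x ∈ l, a ≤ x) :
    a ≤ bigMin l := by
  induction l with
  | nil => exact h1
  | cons y ys ih =>
    rw [bigMin_cons]
    exact le_min (h2 y (by simp)) (ih (fun x hx => h2 x (by simp [hx])))

lemma bigMin_eq_INF_or_mem (l : List Int) : bigMin l = pvINF ∨ bigMin l ∈ l := by
  induction l with
  | nil => exact Or.inl rfl
  | cons y ys ih =>
    rw [bigMin_cons]
    rcases le_total y (bigMin ys) with h | h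
    · right; simp [min_eq_left h]
    · rw [min_eq_right h]
      rcases ih with h' | h'
      · exact Or.inl h'
      · exact Or.inr (by simp [h'])

lemma bigMin_nonneg {l : List Int} (h : ∀ x ∈ l, 0 ≤ x) : 0 ≤ bigMin l :=
  le_bigMin (by norm_num [pvINF]) h

def Qm : List (Nat → Int) → Nat → Int
  | [], j => if j = 0 then 0 else pvINF
  | c :: cs, j => bigMin ((List.range' 1 (j - cs.length)).map (fun m => Qm cs (j - m) + c m))

lemma Qm_le_INF (cs : List (Nat → Int)) (j : Nat) : Qm cs j ≤ pvINF := by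
  cases cs with
  | nil =>
    simp only [Qm]
    split
    · norm_num [pvINF]
    · exact le_refl _
  | cons c cs => exact bigMin_le_INF _

lemma Qm_nonneg (cs : List (Nat → Int)) (hnn : ∀ f ∈ cs, ∀ m, 0 ≤ f m) (j : Nat) :
    0 ≤ Qm cs j := by
  induction cs generalizing j with
  | nil =>
    simp only [Qm]
    split
    · exact le_refl _
    · norm_num [pvINF]
  | cons c cs ih =>
    apply bigMin_nonneg
    intro x hx
    rcases List.mem_map.1 hx with ⟨m, _, rfl⟩
    have h1 := ih (fun f hf => hnn f (List.mem_cons_of_mem _ hf)) (j - m)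
    have h2 := hnn c (by simp) m
    omega

lemma Qm_snoc (cs : List (Nat → Int)) (c : Nat → Int) (j : Nat)
    (hnn : ∀ f ∈ cs ++ [c], ∀ m, 0 ≤ f m) :
    Qm (cs ++ [c]) j =
      bigMin ((List.range' 1 (j - cs.length)).map (fun m => Qm cs (j - m) + c m)) := by
  induction cs generalizing j with
  | nil => simp [Qm]
  | cons c' cs' ih =>
    have hc : ∀ m, 0 ≤ c m := hnn c (by simp)
    have hc' : ∀ m, 0 ≤ c' m := hnn c' (by simp)
    have hnn' : ∀ f ∈ cs' ++ [c], ∀ m, 0 ≤ f m := fun f hf => hnn f (List.mem_cons_of_mem _ hf)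
    apply le_antisymm
    · -- LHS ≤ RHS
      apply le_bigMin
      · show Qm ((c' :: cs') ++ [c]) j ≤ pvINF
        exact Qm_le_INF _ _
      · intro x hx
        rcases List.mem_map.1 hx with ⟨m', hm', rfl⟩
        rw [List.mem_range'_1] at hm'
        simp only [List.length_cons] at hm'
        obtain ⟨hm'1, hm'2⟩ := hm'
        -- x = Qm (c'::cs') (j-m') + c m'
        simp only [Qm]
        rcases bigMin_eq_INF_or_mem ((List.range' 1 (j - m' - cs'.length)).map
            (fun m => Qm cs' (j - m' - m) + c' m)) with hI | hM
        · rw [hI]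
          calc Qm ((c' :: cs') ++ [c]) j ≤ pvINF := Qm_le_INF _ _
          _ ≤ pvINF + c m' := by have := hc m'; omega
        · rcases List.mem_map.1 hM with ⟨m, hm, hEq⟩
          rw [List.mem_range'_1] at hm
          obtain ⟨hm1, hm2⟩ := hm
          rw [← hEq]
          have step1 : Qm ((c' :: cs') ++ [c]) j ≤ Qm (cs' ++ [c]) (j - m) + c' m := by
            show Qm (c' :: (cs' ++ [c])) j ≤ _
            simp only [Qm]
            exact bigMin_le_of_mem (List.mem_map.2 ⟨m, by
              rw [List.mem_range'_1]
              simp only [List.length_append, List.length_cons, List.length_nil]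
              omega, rfl⟩)
          have step2 : Qm (cs' ++ [c]) (j - m) ≤ Qm cs' (j - m - m') + c m' := by
            rw [ih _ hnn']
            exact bigMin_le_of_mem (List.mem_map.2 ⟨m', by rw [List.mem_range'_1]; omega, rfl⟩)
          have heq2 : j - m - m' = j - m' - m := by omega
          calc Qm ((c' :: cs') ++ [c]) j ≤ Qm (cs' ++ [c]) (j - m) + c' m := step1
            _ ≤ (Qm cs' (j - m - m') + c m') + c' m := by have := step2; omega
            _ = Qm cs' (j - m' - m) + c' m + c m' := by rw [heq2]; ring
    · -- RHS ≤ LHS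
      apply le_bigMin
      · exact bigMin_le_INF _
      · intro x hx
        rcases List.mem_map.1 hx with ⟨m, hm, rfl⟩
        rw [List.mem_range'_1] at hm
        simp only [List.append_eq, List.length_append, List.length_cons, List.length_nil] at hm hx ⊢
        obtain ⟨hm1, hm2⟩ := hm
        -- x = Qm (cs'++[c]) (j-m) + c' m;  LHS element of A-recurrence
        rw [ih _ hnn']
        rcases bigMin_eq_INF_or_mem ((List.range' 1 (j - m - cs'.length)).map
            (fun m' => Qm cs' (j - m - m') + c m')) with hI | hM
        · rw [hI]
          calc bigMin ((List.range' 1 (j - (c' :: cs').length)).map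
                (fun m' => Qm (c' :: cs') (j - m') + c m')) ≤ pvINF := bigMin_le_INF _
          _ ≤ pvINF + c' m := by have := hc' m; omega
        · rcases List.mem_map.1 hM with ⟨m', hm', hEq⟩
          rw [List.mem_range'_1] at hm'
          obtain ⟨hm'1, hm'2⟩ := hm'
          rw [← hEq]
          have step1 : bigMin ((List.range' 1 (j - (c' :: cs').length)).map
                (fun m' => Qm (c' :: cs') (j - m') + c m')) ≤ Qm (c' :: cs') (j - m') + c m' := by
            apply bigMin_le_of_mem
            exact List.mem_map.2 ⟨m', by
              rw [List.mem_range'_1]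
              simp only [List.length_cons]
              omega, rfl⟩
          have step2 : Qm (c' :: cs') (j - m') ≤ Qm cs' (j - m' - m) + c' m := by
            simp only [Qm]
            exact bigMin_le_of_mem (List.mem_map.2 ⟨m, by rw [List.mem_range'_1]; omega, rfl⟩)
          have heq2 : j - m' - m = j - m - m' := by omega
          calc bigMin ((List.range' 1 (j - (c' :: cs').length)).map
                (fun m' => Qm (c' :: cs') (j - m') + c m'))
              ≤ Qm (c' :: cs') (j - m') + c m' := step1
            _ ≤ (Qm cs' (j - m' - m) + c' m) + c m' := by have := step2; omega
            _ = Qm cs' (j - m - m') + c m' + c' m := by rw [heq2]; ring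

lemma Qm_cons (c : Nat → Int) (cs : List (Nat → Int)) (j : Nat) :
    Qm (c :: cs) j = bigMin ((List.range' 1 (j - cs.length)).map (fun m => Qm cs (j - m) + c m)) := rfl

lemma Qm_short (cs : List (Nat → Int)) (j : Nat) (h : j < cs.length) : Qm cs j = pvINF := by
  cases cs with
  | nil => simp at h
  | cons c cs' =>
    rw [Qm_cons, show j - cs'.length = 0 from by simp at h; omega]
    rfl

-- min-plus convolution splits Qm across a concatenation of the cost list
lemma Qm_append (cs ds : List (Nat → Int)) (hnn : ∀ f ∈ cs ++ ds, ∀ m, 0 ≤ f m) (s : Nat) :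
    Qm (cs ++ ds) s = bigMin ((List.range' 0 (s + 1)).map (fun i => Qm cs i + Qm ds (s - i))) := by
  induction cs generalizing s with
  | nil =>
    have hnnds : ∀ f ∈ ds, ∀ m, 0 ≤ f m := by simpa using hnn
    simp only [List.nil_append]
    apply le_antisymm
    · apply le_bigMin (Qm_le_INF _ _)
      intro x hx
      obtain ⟨i, hi, rfl⟩ := List.mem_map.1 hx
      rw [List.mem_range'_1] at hi
      by_cases hi0 : i = 0
      · subst hi0
        simp [Qm]
      · have h1 : Qm [] i = pvINF := by simp [Qm, hi0]
        have h2 := Qm_nonneg ds hnnds (s - i)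
        have h3 := Qm_le_INF ds s
        omega
    · have hmem : Qm ([] : List (Nat → Int)) 0 + Qm ds (s - 0)
          ∈ (List.range' 0 (s + 1)).map (fun i => Qm ([] : List (Nat → Int)) i + Qm ds (s - i)) :=
        List.mem_map.2 ⟨0, by rw [List.mem_range'_1]; omega, rfl⟩
      have := bigMin_le_of_mem hmem
      simpa [Qm] using this
  | cons c cs' ih =>
    have hc : ∀ m, 0 ≤ c m := hnn c (by simp)
    have hnn' : ∀ f ∈ cs' ++ ds, ∀ m, 0 ≤ f m := by
      intro f hf
      exact hnn f (by rw [List.cons_append]; exact List.mem_cons_of_mem _ hf)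
    have hnncs' : ∀ f ∈ cs', ∀ m, 0 ≤ f m := fun f hf => hnn' f (List.mem_append_left _ hf)
    have hnnds : ∀ f ∈ ds, ∀ m, 0 ≤ f m := fun f hf => hnn' f (List.mem_append_right _ hf)
    have hnncs : ∀ f ∈ c :: cs', ∀ m, 0 ≤ f m := fun f hf => hnn f (List.mem_append_left _ hf)
    rw [List.cons_append, Qm_cons]
    apply le_antisymm
    · apply le_bigMin (bigMin_le_INF _)
      intro x hx
      obtain ⟨i, hi, rfl⟩ := List.mem_map.1 hx
      rw [List.mem_range'_1] at hi
      by_cases hsd : s - i < ds.length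
      · have h1 : Qm ds (s - i) = pvINF := Qm_short ds _ hsd
        have h2 := Qm_nonneg _ hnncs i
        have h3 := bigMin_le_INF ((List.range' 1 (s - (cs' ++ ds).length)).map
          (fun m => Qm (cs' ++ ds) (s - m) + c m))
        omega
      · rw [Qm_cons c cs' i]
        rcases bigMin_eq_INF_or_mem ((List.range' 1 (i - cs'.length)).map
            (fun m => Qm cs' (i - m) + c m)) with hI | hM
        · rw [hI]
          have h2 := Qm_nonneg ds hnnds (s - i)
          have h3 := bigMin_le_INF ((List.range' 1 (s - (cs' ++ ds).length)).map
            (fun m => Qm (cs' ++ ds) (s - m) + c m))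
          omega
        · obtain ⟨m, hm, hEq⟩ := List.mem_map.1 hM
          rw [List.mem_range'_1] at hm
          rw [← hEq]
          have hstep1 : bigMin ((List.range' 1 (s - (cs' ++ ds).length)).map
              (fun m => Qm (cs' ++ ds) (s - m) + c m)) ≤ Qm (cs' ++ ds) (s - m) + c m := by
            apply bigMin_le_of_mem
            exact List.mem_map.2 ⟨m, by
              rw [List.mem_range'_1]
              simp only [List.length_append]
              omega, rfl⟩
          have hstep2 : Qm (cs' ++ ds) (s - m) ≤ Qm cs' (i - m) + Qm ds (s - i) := by
            rw [ih hnn' (s - m)]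
            have hmm := bigMin_le_of_mem (List.mem_map.2 ⟨i - m, by
              rw [List.mem_range'_1]; omega, rfl⟩)
              (l := (List.range' 0 ((s - m) + 1)).map
                (fun i' => Qm cs' i' + Qm ds ((s - m) - i')))
            rw [show (s - m) - (i - m) = s - i from by omega] at hmm
            exact hmm
          omega
    · apply le_bigMin (bigMin_le_INF _)
      intro x hx
      obtain ⟨m, hm, rfl⟩ := List.mem_map.1 hx
      rw [List.mem_range'_1] at hm
      simp only [List.length_append] at hm
      rw [ih hnn' (s - m)]
      rcases bigMin_eq_INF_or_mem ((List.range' 0 ((s - m) + 1)).map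
          (fun i' => Qm cs' i' + Qm ds ((s - m) - i'))) with hI | hM
      · rw [hI]
        have hcm := hc m
        have h3 := bigMin_le_INF ((List.range' 0 (s + 1)).map
          (fun i => Qm (c :: cs') i + Qm ds (s - i)))
        omega
      · obtain ⟨i', hi', hEq⟩ := List.mem_map.1 hM
        rw [List.mem_range'_1] at hi'
        rw [← hEq]
        by_cases hL : i' < cs'.length
        · have h1 : Qm cs' i' = pvINF := Qm_short cs' i' hL
          rw [h1]
          have h2 := Qm_nonneg ds hnnds ((s - m) - i')
          have hcm := hc m
          have h3 := bigMin_le_INF ((List.range' 0 (s + 1)).map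
            (fun i => Qm (c :: cs') i + Qm ds (s - i)))
          omega
        · have hstep1 : bigMin ((List.range' 0 (s + 1)).map
              (fun i => Qm (c :: cs') i + Qm ds (s - i)))
              ≤ Qm (c :: cs') (i' + m) + Qm ds (s - (i' + m)) := by
            apply bigMin_le_of_mem
            exact List.mem_map.2 ⟨i' + m, by rw [List.mem_range'_1]; omega, rfl⟩
          have hstep2 : Qm (c :: cs') (i' + m) ≤ Qm cs' i' + c m := by
            rw [Qm_cons]
            have hmm := bigMin_le_of_mem (List.mem_map.2 ⟨m, by
              rw [List.mem_range'_1]; omega, rfl⟩)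
              (l := (List.range' 1 ((i' + m) - cs'.length)).map
                (fun m' => Qm cs' ((i' + m) - m') + c m'))
            simpa [show i' + m - m = i' from by omega] using hmm
          rw [show s - (i' + m) = (s - m) - i' from by omega] at hstep1
          omega

-- ---- calcWait facts ----
def pvStep (m : Int) (st : List Int × Int) (ab : Int × Int) : List Int × Int :=
  if PySem.List.len st.1 < m then
    (pvInsort (ab.1 + ab.2) st.1, st.2)
  else
    match st.1 with
    | [] => st
    | e :: rest =>
      let s := max ab.1 e
      (pvInsort (s + ab.2) rest, st.2 + (s - ab.1))

lemma calcWaitA_eq (rl : List (Int × Int)) (m : Int) :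
    calcWaitA rl m = if rl = [] then 0 else (rl.foldl (pvStep m) ([], 0)).2 := rfl

lemma calcWaitB_eq_A (rl : List (Int × Int)) (m : Int) : calcWaitB rl m = calcWaitA rl m := by
  cases rl <;> rfl

lemma calc_fold_nonneg (rl : List (Int × Int)) (m : Int) :
    ∀ heap tw, 0 ≤ tw → 0 ≤ (rl.foldl (pvStep m) (heap, tw)).2 := by
  induction rl with
  | nil => intro heap tw h; exact h
  | cons ab rl ih =>
    intro heap tw h
    rw [List.foldl_cons]
    by_cases hlt : PySem.List.len heap < m
    · simp only [pvStep, if_pos hlt]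
      exact ih _ _ h
    · cases heap with
      | nil =>
        simp only [pvStep, if_neg hlt]
        exact ih _ _ h
      | cons e rest =>
        simp only [pvStep, if_neg hlt]
        exact ih _ _ (by have := le_max_left ab.1 e; omega)

lemma calcWaitA_nonneg (rl : List (Int × Int)) (m : Int) : 0 ≤ calcWaitA rl m := by
  rw [calcWaitA_eq]
  split
  · exact le_refl _
  · exact calc_fold_nonneg rl m [] 0 (le_refl _)

-- ---- buckets (Python list indexing, including in-range negative type ids) ----
-- the effective bucket index of type id c in a bucket list of length L (Python wrap)
def pvEff (L : Nat) (c : Int) : Nat := if 0 ≤ c then c.toNat else ((L : Int) + c).toNat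

def pvBucketW (L : Nat) (reqs : List (Int × Int × Int)) (t : Nat) : List (Int × Int) :=
  (reqs.filter (fun r => pvEff L r.2.2 == t)).map (fun r => (r.1, r.2.1))

def pvCf (L : Nat) (reqs : List (Int × Int × Int)) (t : Nat) : Nat → Int :=
  fun m => calcWaitA (pvBucketW L reqs t) (m : Int)

-- xs[c] = v and xs[c] for an in-range possibly negative index, as List.set / List.getD
lemma pySetD_eff {α : Type} (xs : List α) (c : Int) (v : α)
    (h1 : -(xs.length : Int) ≤ c) (h2 : c < (xs.length : Int)) :
    PySem.List.pySetD xs c v = xs.set (pvEff xs.length c) v := by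
  by_cases hc : 0 ≤ c
  · rw [PySem.List.pySetD_of_nonneg _ _ hc, pvEff, if_pos hc]
  · unfold PySem.List.pySetD PySem.List.pySet? PySem.List.pyIdx?
    split_ifs
    simp only [Option.map_some, Option.getD_some]
    rw [pvEff, if_neg hc]
    congr 1
    omega

lemma pyGetD_eff {α : Type} (xs : List α) (c : Int) (d : α)
    (h1 : -(xs.length : Int) ≤ c) (h2 : c < (xs.length : Int)) :
    PySem.List.pyGetD xs c d = xs.getD (pvEff xs.length c) d := by
  by_cases hc : 0 ≤ c
  · rw [show c = ((c.toNat : Nat) : Int) from by omega, PySem.List.pyGetD_natCast, pvEff,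
      if_pos (by omega), Int.toNat_natCast]
  · unfold PySem.List.pyGetD PySem.List.pyGet? PySem.List.pyIdx?
    split_ifs
    rw [show xs.length - (-c).toNat = pvEff xs.length c from by
      rw [pvEff, if_neg hc]; omega]
    simp [List.getD_eq_getElem?_getD]

-- the bucket-building fold appends request (a,b) to the effective entry of c
lemma byType_foldl (reqs : List (Int × Int × Int)) :
    ∀ (bt : List (List (Int × Int))),
      (∀ r ∈ reqs, -(bt.length : Int) ≤ r.2.2 ∧ r.2.2 < (bt.length : Int)) →
      (reqs.foldl (fun bt r =>
          PySem.List.pySetD bt r.2.2 (PySem.List.pyGetD bt r.2.2 [] ++ [(r.1, r.2.1)])) bt).length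
        = bt.length ∧
      ∀ t : Nat, t < bt.length →
        (reqs.foldl (fun bt r =>
            PySem.List.pySetD bt r.2.2 (PySem.List.pyGetD bt r.2.2 [] ++ [(r.1, r.2.1)])) bt).getD t []
          = bt.getD t [] ++ pvBucketW bt.length reqs t := by
  induction reqs with
  | nil => intro bt _; exact ⟨rfl, fun t _ => by simp [pvBucketW]⟩
  | cons r rs ih =>
    intro bt h
    obtain ⟨hc0, hclt⟩ := h r (by simp)
    have heL : pvEff bt.length r.2.2 < bt.length := by
      rw [pvEff]; split_ifs <;> omega
    set bt' := PySem.List.pySetD bt r.2.2 (PySem.List.pyGetD bt r.2.2 [] ++ [(r.1, r.2.1)]) with hbt'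
    have hbt'' : bt' = bt.set (pvEff bt.length r.2.2)
        (bt.getD (pvEff bt.length r.2.2) [] ++ [(r.1, r.2.1)]) := by
      rw [hbt', pySetD_eff bt r.2.2 _ hc0 hclt, pyGetD_eff bt r.2.2 _ hc0 hclt]
    have hlen' : bt'.length = bt.length := by
      rw [hbt'']
      exact List.length_set ..
    have h' : ∀ x ∈ rs, -(bt'.length : Int) ≤ x.2.2 ∧ x.2.2 < (bt'.length : Int) := by
      intro x hx
      rw [hlen']
      exact h x (by simp [hx])
    obtain ⟨ihlen, ihget⟩ := ih bt' h'
    constructor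
    · rw [List.foldl_cons, ← hbt', ihlen, hlen']
    · intro t ht
      rw [List.foldl_cons, ← hbt', ihget t (by omega), hlen']
      by_cases hte : pvEff bt.length r.2.2 = t
      · have hbeq : (pvEff bt.length r.2.2 == t) = true := by simp [hte]
        have hget' : bt'.getD t [] = bt.getD t [] ++ [(r.1, r.2.1)] := by
          rw [hbt'', ← hte]
          rw [List.getD_eq_getElem?_getD, List.getElem?_set_self heL]
          rfl
        rw [hget']
        have hfc : pvBucketW bt.length (r :: rs) t = (r.1, r.2.1) :: pvBucketW bt.length rs t := by
          simp only [pvBucketW, List.filter_cons, hbeq, if_true, List.map_cons]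
        rw [hfc, List.append_assoc]
        rfl
      · have hbeq : (pvEff bt.length r.2.2 == t) = false := by
          simp only [beq_eq_false_iff_ne]; omega
        have hget' : bt'.getD t [] = bt.getD t [] := by
          rw [hbt'']
          rw [List.getD_eq_getElem?_getD, List.getElem?_set_ne (by omega), ← List.getD_eq_getElem?_getD]
        rw [hget']
        have hfc : pvBucketW bt.length (r :: rs) t = pvBucketW bt.length rs t := by
          simp only [pvBucketW, List.filter_cons, hbeq, Bool.false_eq_true, if_false]
        rw [hfc]

def pvCLs (cf : Nat → Nat → Int) (t0 : Nat) : Nat → List (Nat → Int)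
  | 0 => []
  | cnt + 1 => cf t0 :: pvCLs cf (t0 + 1) cnt

lemma pvCLs_cons (cf : Nat → Nat → Int) (t0 : Nat) (cnt : Nat) :
    pvCLs cf t0 (cnt + 1) = cf t0 :: pvCLs cf (t0 + 1) cnt := rfl

lemma pvCLs_snoc (cf : Nat → Nat → Int) (t0 : Nat) (cnt : Nat) :
    pvCLs cf t0 (cnt + 1) = pvCLs cf t0 cnt ++ [cf (t0 + cnt)] := by
  induction cnt generalizing t0 with
  | zero => simp [pvCLs]
  | succ c ih =>
    have he : t0 + 1 + c = t0 + (c + 1) := by omega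
    rw [pvCLs_cons, ih (t0 + 1), he, pvCLs_cons, List.cons_append]

lemma pvCLs_length (cf : Nat → Nat → Int) (t0 cnt : Nat) :
    (pvCLs cf t0 cnt).length = cnt := by
  induction cnt generalizing t0 with
  | zero => rfl
  | succ c ih => simp [pvCLs, ih]

lemma pvCLs_nonneg (cf : Nat → Nat → Int) (hcf : ∀ t m, 0 ≤ cf t m) (t0 cnt : Nat) :
    ∀ f ∈ pvCLs cf t0 cnt, ∀ m, 0 ≤ f m := by
  induction cnt generalizing t0 with
  | zero => intro f hf; cases hf
  | succ c ih =>
    intro f hf m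
    rcases List.mem_cons.1 hf with rfl | hf'
    · exact hcf t0 m
    · exact ih (t0 + 1) f hf' m

lemma pv_getD_set {α : Type} (l : List α) (i j : Nat) (v d : α) :
    (l.set i v).getD j d = if i = j ∧ i < l.length then v else l.getD j d := by
  simp only [List.getD_eq_getElem?_getD, List.getElem?_set]
  by_cases h1 : i = j
  · subst h1
    by_cases h2 : i < l.length
    · simp [h2]
    · simp [h2]
  · simp [h1]

-- ---- 2-D table lemmas (Nat-cast indices; the loops only produce nonnegative ones) ----
lemma pvTblSet_length (tbl : List (List Int)) (i j : Nat) (v : Int) :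
    (pvTblSet tbl (i : Int) (j : Int) v).length = tbl.length := by
  simp [pvTblSet, PySem.List.pySetD_natCast]

lemma pvTblSet_rowlen (tbl : List (List Int)) (i j : Nat) (v : Int) (t : Nat) :
    ((pvTblSet tbl (i : Int) (j : Int) v).getD t []).length = (tbl.getD t []).length := by
  simp only [pvTblSet, PySem.List.pySetD_natCast, PySem.List.pyGetD_natCast]
  rw [pv_getD_set]
  split_ifs with h
  · obtain ⟨rfl, _⟩ := h
    simp [List.length_set]
  · rfl

lemma pvTblGet_natCast (tbl : List (List Int)) (i j : Nat) :
    pvTblGet tbl (i : Int) (j : Int) = (tbl.getD i []).getD j 0 := by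
  simp [pvTblGet]

lemma pvTblGet_set_self (tbl : List (List Int)) (i j : Nat) (v : Int)
    (hi : i < tbl.length) (hj : j < (tbl.getD i []).length) :
    pvTblGet (pvTblSet tbl (i : Int) (j : Int) v) (i : Int) (j : Int) = v := by
  simp only [pvTblGet, pvTblSet, PySem.List.pySetD_natCast, PySem.List.pyGetD_natCast]
  rw [pv_getD_set, if_pos ⟨rfl, hi⟩, pv_getD_set, if_pos ⟨rfl, hj⟩]

lemma pvTblGet_set_ne (tbl : List (List Int)) (i j : Nat) (v : Int) (t m : Nat)
    (h : t ≠ i ∨ m ≠ j) :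
    pvTblGet (pvTblSet tbl (i : Int) (j : Int) v) (t : Int) (m : Int) = pvTblGet tbl (t : Int) (m : Int) := by
  simp only [pvTblGet, pvTblSet, PySem.List.pySetD_natCast, PySem.List.pyGetD_natCast]
  rw [pv_getD_set]
  split_ifs with h1
  · obtain ⟨rfl, _⟩ := h1
    rw [pv_getD_set, if_neg (by omega)]
  · rfl

lemma pvTblSet_oob (tbl : List (List Int)) (i j : Nat) (v : Int)
    (h : tbl.length ≤ i ∨ (tbl.getD i []).length ≤ j) :
    pvTblSet tbl (i : Int) (j : Int) v = tbl := by
  simp only [pvTblSet, PySem.List.pySetD_natCast, PySem.List.pyGetD_natCast]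
  by_cases hi : tbl.length ≤ i
  · exact List.set_eq_of_length_le hi
  · have hj : (tbl.getD i []).length ≤ j := by tauto
    rw [List.set_eq_of_length_le hj]
    rw [List.getD_eq_getElem?_getD, List.getElem?_eq_getElem (by omega)]
    simp only [Option.getD_some]
    exact List.set_getElem_self (by omega)

-- ---- inner row-fill loop of the cost table ----
lemma costRow_fill (f : Int → Int) (t : Nat) (c : Nat) (tbl : List (List Int)) :
    (((PySem.List.pyRange 1 (1 + (c : Int)) 1).foldl
        (fun tb m => pvTblSet tb (t : Int) m (f m)) tbl).length = tbl.length ∧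
      ∀ t' : Nat, (((PySem.List.pyRange 1 (1 + (c : Int)) 1).foldl
        (fun tb m => pvTblSet tb (t : Int) m (f m)) tbl).getD t' []).length = (tbl.getD t' []).length) ∧
    ∀ t' m' : Nat,
      pvTblGet ((PySem.List.pyRange 1 (1 + (c : Int)) 1).foldl
        (fun tb m => pvTblSet tb (t : Int) m (f m)) tbl) (t' : Int) (m' : Int)
      = if t' = t ∧ 1 ≤ m' ∧ m' ≤ c ∧ t' < tbl.length ∧ m' < (tbl.getD t' []).length
        then f (m' : Int) else pvTblGet tbl (t' : Int) (m' : Int) := by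
  induction c with
  | zero =>
    rw [PySem.List.pyRange_one_eq_nil (by omega)]
    refine ⟨⟨rfl, fun _ => rfl⟩, ?_⟩
    intro t' m'
    rw [if_neg (by omega)]
    rfl
  | succ c ih =>
    have hsplit : (1 + ((c + 1 : Nat) : Int)) = (1 + (c : Int)) + 1 := by push_cast; ring
    rw [hsplit, PySem.List.pyRange_one_succ_right (by omega), List.foldl_append, List.foldl_cons,
      List.foldl_nil]
    obtain ⟨⟨ihlen, ihrow⟩, ihget⟩ := ih
    have hcast : (1 + (c : Int)) = ((1 + c : Nat) : Int) := by push_cast; ring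
    rw [hcast] at ihlen ihrow ihget ⊢
    refine ⟨⟨?_, ?_⟩, ?_⟩
    · rw [pvTblSet_length, ihlen]
    · intro t'
      rw [pvTblSet_rowlen, ihrow]
    · intro t' m'
      by_cases heq : t' = t ∧ m' = 1 + c
      · obtain ⟨h1, h2⟩ := heq
        subst h1; subst h2
        by_cases hin : t' < tbl.length ∧ 1 + c < (tbl.getD t' []).length
        · rw [pvTblGet_set_self _ _ _ _ (by rw [ihlen]; exact hin.1)
            (by rw [ihrow]; exact hin.2)]
          rw [if_pos (by omega)]
        · rw [pvTblSet_oob _ _ _ _ (by rw [ihlen, ihrow]; omega), ihget]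
          rw [if_neg (by omega), if_neg (by omega)]
      · rw [pvTblGet_set_ne _ _ _ _ _ _ (by omega), ihget t' m']
        by_cases hcond : t' = t ∧ 1 ≤ m' ∧ m' ≤ c ∧ t' < tbl.length ∧ m' < (tbl.getD t' []).length
        · rw [if_pos hcond, if_pos (by omega)]
        · rw [if_neg hcond, if_neg (by omega)]

-- ---- named views of A's loops (definitionally equal to the port) ----
def pvByType (k : Int) (reqs : List (Int × Int × Int)) : List (List (Int × Int)) :=
  reqs.foldl
    (fun bt r => PySem.List.pySetD bt r.2.2 (PySem.List.pyGetD bt r.2.2 [] ++ [(r.1, r.2.1)]))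
    ((PySem.List.pyRange 0 (k + 1) 1).map (fun _ => []))

def pvCost (k n : Int) (reqs : List (Int × Int × Int)) : List (List Int) :=
  (PySem.List.pyRange 1 (k + 1) 1).foldl
    (fun cost t =>
      (PySem.List.pyRange 1 (n + 1) 1).foldl
        (fun cost m => pvTblSet cost t m (calcWaitA (PySem.List.pyGetD (pvByType k reqs) t []) m))
        cost)
    ((PySem.List.pyRange 0 (k + 1) 1).map (fun _ => List.replicate (n + 1).toNat 0))

def pvDp0 (k n : Int) : List (List Int) :=
  pvTblSet ((PySem.List.pyRange 0 (k + 1) 1).map (fun _ => List.replicate (n + 1).toNat pvINF)) 0 0 0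

def pvDpM (cost : List (List Int)) (i j : Int) (dp : List (List Int)) : List (List Int) :=
  (PySem.List.pyRange 1 (j - (i - 1) + 1) 1).foldl
    (fun dp m =>
      pvTblSet dp i j (min (pvTblGet dp i j) (pvTblGet dp (i - 1) (j - m) + pvTblGet cost i m)))
    dp

def pvDpJ (cost : List (List Int)) (n i : Int) (dp : List (List Int)) : List (List Int) :=
  (PySem.List.pyRange i (n + 1) 1).foldl (fun dp j => pvDpM cost i j dp) dp

def pvDpLoop (cost : List (List Int)) (k n : Int) (dp0 : List (List Int)) : List (List Int) :=
  (PySem.List.pyRange 1 (k + 1) 1).foldl (fun dp i => pvDpJ cost n i dp) dp0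

lemma solution_view (k n : Int) (reqs : List (Int × Int × Int)) :
    solution k n reqs = pvTblGet (pvDpLoop (pvCost k n reqs) k n (pvDp0 k n)) k n := rfl

-- ---- dp0 ----
lemma pvTblSet_length' (tbl : List (List Int)) (i j : Int) (v : Int) :
    (pvTblSet tbl i j v).length = tbl.length := by
  simp [pvTblSet, PySem.List.length_pySetD]

lemma pvDp0_eq (k n : Int) :
    pvDp0 k n = pvTblSet ((PySem.List.pyRange 0 (k + 1) 1).map
      (fun _ => List.replicate (n + 1).toNat pvINF)) (((0 : Nat) : Int)) (((0 : Nat) : Int)) 0 := rfl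

lemma pvDp0M_len (k n : Int) (hk : 0 ≤ k) :
    ((PySem.List.pyRange 0 (k + 1) 1).map (fun _ => List.replicate (n + 1).toNat pvINF)).length
      = k.toNat + 1 := by
  rw [List.length_map, PySem.List.length_pyRange_one]
  omega

lemma pvDp0M_get (k n : Int) (hk : 0 ≤ k) (t : Nat) (ht : t < k.toNat + 1) :
    ((PySem.List.pyRange 0 (k + 1) 1).map (fun _ => List.replicate (n + 1).toNat pvINF)).getD t []
      = List.replicate (n + 1).toNat pvINF := by
  rw [List.getD_eq_getElem?_getD, List.getElem?_map, PySem.List.getElem?_pyRange_one]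
  rw [if_pos (by omega)]
  rfl

lemma pvDp0_length (k n : Int) (hk : 0 ≤ k) : (pvDp0 k n).length = k.toNat + 1 := by
  rw [pvDp0, pvTblSet_length', pvDp0M_len k n hk]

lemma pvDp0_rowlen (k n : Int) (t : Nat) (hk : 0 ≤ k) (hn : 0 ≤ n) (ht : t < k.toNat + 1) :
    ((pvDp0 k n).getD t []).length = n.toNat + 1 := by
  rw [pvDp0_eq, pvTblSet_rowlen, pvDp0M_get k n hk t ht, List.length_replicate]
  omega

lemma pvDp0_get (k n : Int) (hk : 0 ≤ k) (hn : 0 ≤ n) (r j : Nat)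
    (hr : r < k.toNat + 1) (hj : j < n.toNat + 1) :
    pvTblGet (pvDp0 k n) (r : Int) (j : Int) = if r = 0 ∧ j = 0 then 0 else pvINF := by
  rw [pvDp0_eq]
  by_cases h : r = 0 ∧ j = 0
  · obtain ⟨rfl, rfl⟩ := h
    rw [pvTblGet_set_self _ _ _ _ (by rw [pvDp0M_len k n hk]; omega)
      (by rw [pvDp0M_get k n hk 0 (by omega)]; rw [List.length_replicate]; omega)]
    simp
  · rw [pvTblGet_set_ne _ _ _ _ _ _ (by omega), if_neg h, pvTblGet_natCast,
      pvDp0M_get k n hk r hr, List.getD_eq_getElem?_getD, List.getElem?_replicate]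
    rw [if_pos (by omega)]
    rfl

-- dp = set dp i j (current value) when in range
lemma pvTblSet_self (dp : List (List Int)) (i j : Nat)
    (hi : i < dp.length) (hj : j < (dp.getD i []).length) :
    pvTblSet dp (i : Int) (j : Int) (pvTblGet dp (i : Int) (j : Int)) = dp := by
  simp only [pvTblGet, pvTblSet, PySem.List.pySetD_natCast, PySem.List.pyGetD_natCast]
  rw [List.getD_eq_getElem?_getD (l := dp.getD i []), List.getElem?_eq_getElem hj,
    Option.getD_some, List.set_getElem_self]
  rw [List.getD_eq_getElem?_getD, List.getElem?_eq_getElem hi, Option.getD_some]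
  exact List.set_getElem_self hi

lemma pvTblSet_set (dp : List (List Int)) (i j : Nat) (a b : Int) :
    pvTblSet (pvTblSet dp (i : Int) (j : Int) a) (i : Int) (j : Int) b
      = pvTblSet dp (i : Int) (j : Int) b := by
  simp only [pvTblSet, PySem.List.pySetD_natCast, PySem.List.pyGetD_natCast]
  by_cases hi : i < dp.length
  · rw [pv_getD_set, if_pos ⟨rfl, hi⟩, List.set_set, List.set_set]
  · rw [List.set_eq_of_length_le (l := dp) (i := i) (by omega)]

-- ---- the m-loop: accumulates a running min into cell (i,j) ----
lemma pvDpM_fold (cost dp : List (List Int)) (i j : Nat) (ms : List Int)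
    (hi1 : 1 ≤ i) (hi : i < dp.length) (hj : j < (dp.getD i []).length)
    (hms : ∀ m ∈ ms, 1 ≤ m ∧ m ≤ (j : Int)) :
    ∀ a : Int,
      ms.foldl
        (fun dp m =>
          pvTblSet dp (i : Int) (j : Int)
            (min (pvTblGet dp (i : Int) (j : Int))
              (pvTblGet dp ((i : Int) - 1) ((j : Int) - m) + pvTblGet cost (i : Int) m)))
        (pvTblSet dp (i : Int) (j : Int) a)
      = pvTblSet dp (i : Int) (j : Int)
          (ms.foldl
            (fun acc m =>
              min acc (pvTblGet dp ((i : Int) - 1) ((j : Int) - m) + pvTblGet cost (i : Int) m)) a) := by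
  induction ms with
  | nil => intro a; rfl
  | cons m ms ih =>
    intro a
    rw [List.foldl_cons, List.foldl_cons]
    obtain ⟨hm1, hm2⟩ := hms m (by simp)
    have hcast1 : ((i : Int) - 1) = ((i - 1 : Nat) : Int) := by omega
    have hcast2 : ((j : Int) - m) = (((((j : Int) - m).toNat) : Nat) : Int) := by omega
    have hget1 : pvTblGet (pvTblSet dp (i : Int) (j : Int) a) (i : Int) (j : Int) = a :=
      pvTblGet_set_self _ _ _ _ hi hj
    have hget2 : pvTblGet (pvTblSet dp (i : Int) (j : Int) a) ((i : Int) - 1) ((j : Int) - m)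
        = pvTblGet dp ((i : Int) - 1) ((j : Int) - m) := by
      rw [hcast1, hcast2]
      exact pvTblGet_set_ne _ _ _ _ _ _ (Or.inl (by omega))
    rw [hget1, hget2, pvTblSet_set]
    exact ih (fun m' hm' => hms m' (by simp [hm'])) _

lemma pvDpM_char (cost dp : List (List Int)) (i j : Nat)
    (hi1 : 1 ≤ i) (hi : i < dp.length) (hj : j < (dp.getD i []).length) :
    pvDpM cost (i : Int) (j : Int) dp
      = pvTblSet dp (i : Int) (j : Int)
          ((PySem.List.pyRange 1 ((j : Int) - ((i : Int) - 1) + 1) 1).foldl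
            (fun acc m =>
              min acc (pvTblGet dp ((i : Int) - 1) ((j : Int) - m) + pvTblGet cost (i : Int) m))
            (pvTblGet dp (i : Int) (j : Int))) := by
  rw [pvDpM, ← pvDpM_fold cost dp i j _ hi1 hi hj
    (fun m hm => by rw [PySem.List.mem_pyRange_one] at hm; omega)]
  rw [pvTblSet_self dp i j hi hj]

-- ---- full cost-table fill ----
lemma costFill_outer (f : Int → Int → Int) (N K : Nat) (tbl : List (List Int)) :
    (((PySem.List.pyRange 1 (1 + (K : Int)) 1).foldl
        (fun tb t => (PySem.List.pyRange 1 (1 + (N : Int)) 1).foldl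
          (fun tb m => pvTblSet tb t m (f t m)) tb) tbl).length = tbl.length ∧
      ∀ t' : Nat, (((PySem.List.pyRange 1 (1 + (K : Int)) 1).foldl
        (fun tb t => (PySem.List.pyRange 1 (1 + (N : Int)) 1).foldl
          (fun tb m => pvTblSet tb t m (f t m)) tb) tbl).getD t' []).length = (tbl.getD t' []).length) ∧
    ∀ t' m' : Nat,
      pvTblGet ((PySem.List.pyRange 1 (1 + (K : Int)) 1).foldl
        (fun tb t => (PySem.List.pyRange 1 (1 + (N : Int)) 1).foldl
          (fun tb m => pvTblSet tb t m (f t m)) tb) tbl) (t' : Int) (m' : Int)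
      = if 1 ≤ t' ∧ t' ≤ K ∧ 1 ≤ m' ∧ m' ≤ N ∧ t' < tbl.length ∧ m' < (tbl.getD t' []).length
        then f (t' : Int) (m' : Int) else pvTblGet tbl (t' : Int) (m' : Int) := by
  induction K with
  | zero =>
    rw [show PySem.List.pyRange 1 (1 + ((0 : Nat) : Int)) 1 = [] from
      PySem.List.pyRange_one_eq_nil (by omega)]
    refine ⟨⟨rfl, fun _ => rfl⟩, ?_⟩
    intro t' m'
    rw [if_neg (by omega)]
    rfl
  | succ K ih =>
    have hsplit : (1 + ((K + 1 : Nat) : Int)) = (1 + (K : Int)) + 1 := by push_cast; ring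
    rw [hsplit, PySem.List.pyRange_one_succ_right (by omega), List.foldl_append, List.foldl_cons,
      List.foldl_nil]
    obtain ⟨⟨ihlen, ihrow⟩, ihget⟩ := ih
    have hcast : (1 + (K : Int)) = ((1 + K : Nat) : Int) := by push_cast; ring
    rw [hcast] at ihlen ihrow ihget ⊢
    obtain ⟨⟨rlen, rrow⟩, rget⟩ := costRow_fill (f ((1 + K : Nat) : Int)) (1 + K) N
      ((PySem.List.pyRange 1 ((1 + K : Nat) : Int) 1).foldl
        (fun tb t => (PySem.List.pyRange 1 (1 + (N : Int)) 1).foldl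
          (fun tb m => pvTblSet tb t m (f t m)) tb) tbl)
    refine ⟨⟨by rw [rlen, ihlen], fun t' => by rw [rrow, ihrow]⟩, ?_⟩
    intro t' m'
    rw [rget t' m']
    by_cases hrow : t' = 1 + K
    · subst hrow
      by_cases hm : 1 ≤ m' ∧ m' ≤ N ∧ 1 + K < tbl.length ∧ m' < (tbl.getD (1 + K) []).length
      · rw [if_pos ⟨rfl, hm.1, hm.2.1, by rw [ihlen]; omega, by rw [ihrow]; omega⟩,
          if_pos (by omega)]
      · rw [if_neg (by rw [ihlen, ihrow]; omega), ihget, if_neg (by omega), if_neg (by omega)]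
    · rw [if_neg (by omega), ihget]
      by_cases hcond : 1 ≤ t' ∧ t' ≤ K ∧ 1 ≤ m' ∧ m' ≤ N ∧ t' < tbl.length ∧ m' < (tbl.getD t' []).length
      · rw [if_pos hcond, if_pos (by omega)]
      · rw [if_neg hcond, if_neg (by omega)]

-- ---- cost table = per-type wait costs ----
lemma map_const_getD2 {α β : Type} (l : List β) (t : Nat) (c : α) (d : α) (h : t < l.length) :
    (l.map (fun _ => c)).getD t d = c := by
  rw [List.getD_eq_getElem?_getD, List.getElem?_map, List.getElem?_eq_getElem h]
  rfl

lemma pvByType_get (K : Nat) (reqs : List (Int × Int × Int))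
    (hreq : ∀ r ∈ reqs, -((K : Int) + 1) ≤ r.2.2 ∧ r.2.2 ≤ (K : Int)) (t : Nat) (ht : t < K + 1) :
    PySem.List.pyGetD (pvByType (K : Int) reqs) (t : Int) [] = pvBucketW (K + 1) reqs t := by
  have hlen : ((PySem.List.pyRange 0 ((K : Int) + 1) 1).map
      (fun _ => ([] : List (Int × Int)))).length = K + 1 := by
    rw [List.length_map, PySem.List.length_pyRange_one]; omega
  obtain ⟨_, hget⟩ := byType_foldl reqs
    ((PySem.List.pyRange 0 ((K : Int) + 1) 1).map (fun _ => ([] : List (Int × Int))))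
    (by intro r hr; obtain ⟨h1, h2⟩ := hreq r hr; rw [hlen]; constructor <;> omega)
  rw [PySem.List.pyGetD_natCast, pvByType, hget t (by
      simp only [List.length_map, PySem.List.length_pyRange_one]; omega),
    map_const_getD2 _ _ _ _ (by simp only [PySem.List.length_pyRange_one]; omega), hlen]
  rfl

lemma pvCost_spec (k n : Int) (reqs : List (Int × Int × Int)) (hk : 0 ≤ k) (hn : 0 ≤ n)
    (hreq : ∀ r ∈ reqs, -(k + 1) ≤ r.2.2 ∧ r.2.2 ≤ k) (t m : Nat)
    (h1 : 1 ≤ t) (h2 : t ≤ k.toNat) (h3 : 1 ≤ m) (h4 : m ≤ n.toNat) :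
    pvTblGet (pvCost k n reqs) (t : Int) (m : Int) = pvCf (k.toNat + 1) reqs t m := by
  have hkk : k = ((k.toNat : Nat) : Int) := by omega
  have hnn : n = ((n.toNat : Nat) : Int) := by omega
  rw [pvCost, hkk, hnn, add_comm ((k.toNat : Nat) : Int) 1, add_comm ((n.toNat : Nat) : Int) 1]
  obtain ⟨⟨hlen, hrow⟩, hget⟩ := costFill_outer
    (fun t m => calcWaitA (PySem.List.pyGetD (pvByType ((k.toNat : Nat) : Int) reqs) t []) m)
    n.toNat k.toNat
    ((PySem.List.pyRange 0 (1 + ((k.toNat : Nat) : Int)) 1).map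
      (fun _ => List.replicate (1 + ((n.toNat : Nat) : Int)).toNat 0))
  have htblLen : ((PySem.List.pyRange 0 (1 + ((k.toNat : Nat) : Int)) 1).map
      (fun _ => List.replicate (1 + ((n.toNat : Nat) : Int)).toNat (0 : Int))).length = k.toNat + 1 := by
    rw [List.length_map, PySem.List.length_pyRange_one]; omega
  rw [hget t m, if_pos ⟨h1, h2, h3, h4, by rw [htblLen]; omega, by
    rw [map_const_getD2 _ _ _ _ (by rw [PySem.List.length_pyRange_one]; omega), List.length_replicate]
    omega⟩]
  show calcWaitA (PySem.List.pyGetD (pvByType ((k.toNat : Nat) : Int) reqs) (t : Int) []) (m : Int) = _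
  rw [pvByType_get k.toNat reqs (by intro r hr; have := hreq r hr; constructor <;> omega) t (by omega)]
  simp only [Int.toNat_natCast]
  rfl

-- ---- Int fold over a range of minima = bigMin over the matching Nat range ----
lemma foldl_min_bridge (g : Int → Int) (g' : Nat → Int) (c : Nat)
    (hg : ∀ s : Nat, s < c → g (1 + (s : Int)) = g' (1 + s)) :
    (PySem.List.pyRange 1 (1 + (c : Int)) 1).foldl (fun acc m => min acc (g m)) pvINF
      = bigMin ((List.range' 1 c).map g') := by
  rw [PySem.List.pyRange_one]
  have h1 : ((1 + (c : Int)) - 1).toNat = c := by omega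
  rw [h1, List.foldl_map, bigMin, List.range'_eq_map_range, List.foldl_map, List.foldl_map]
  apply PySem.List.foldl_congr_mem
  intro acc s hs
  rw [List.mem_range] at hs
  rw [hg s hs]

-- ---- the DP value recurrence ----
lemma pvR_zero (K : Nat) (reqs : List (Int × Int × Int)) (j : Nat) :
    Qm (pvCLs (pvCf (K + 1) reqs) 1 0) j = if j = 0 then 0 else pvINF := rfl

lemma pvR_rec (K : Nat) (reqs : List (Int × Int × Int)) (i j : Nat) (hi : 1 ≤ i) :
    Qm (pvCLs (pvCf (K + 1) reqs) 1 i) j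
      = bigMin ((List.range' 1 (j - (i - 1))).map
          (fun m => Qm (pvCLs (pvCf (K + 1) reqs) 1 (i - 1)) (j - m) + pvCf (K + 1) reqs i m)) := by
  obtain ⟨i', rfl⟩ : ∃ i', i = i' + 1 := ⟨i - 1, by omega⟩
  have hsn := pvCLs_snoc (pvCf (K + 1) reqs) 1 i'
  have hnn : ∀ f ∈ pvCLs (pvCf (K + 1) reqs) 1 i' ++ [pvCf (K + 1) reqs (1 + i')], ∀ m, 0 ≤ f m := by
    rw [← hsn]
    exact pvCLs_nonneg (pvCf (K + 1) reqs) (fun t m => calcWaitA_nonneg _ _) 1 (i' + 1)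
  rw [hsn, Qm_snoc _ _ _ hnn, pvCLs_length]
  have h1 : i' + 1 - 1 = i' := by omega
  have h2 : 1 + i' = i' + 1 := by omega
  rw [h1, h2]

lemma pvR_short (K : Nat) (reqs : List (Int × Int × Int)) (r j : Nat) (h : j < r) :
    Qm (pvCLs (pvCf (K + 1) reqs) 1 r) j = pvINF :=
  Qm_short _ j (by rw [pvCLs_length]; omega)

-- ---- the j-loop of row i ----
lemma pvDpJ_aux (reqs : List (Int × Int × Int)) (cost dp : List (List Int)) (K N i : Nat)
    (hi1 : 1 ≤ i) (hiK : i ≤ K)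
    (hcost : ∀ t m : Nat, 1 ≤ t → t ≤ K → 1 ≤ m → m ≤ N →
      pvTblGet cost (t : Int) (m : Int) = pvCf (K + 1) reqs t m)
    (hlen : dp.length = K + 1)
    (hrow : ∀ t : Nat, t < K + 1 → (dp.getD t []).length = N + 1)
    (hget : ∀ r j : Nat, r < K + 1 → j < N + 1 →
      pvTblGet dp (r : Int) (j : Int) = if r ≤ i - 1 then Qm (pvCLs (pvCf (K + 1) reqs) 1 r) j else pvINF) :
    ∀ b : Nat, i ≤ b → b ≤ N + 1 →
      ((PySem.List.pyRange (i : Int) (b : Int) 1).foldl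
          (fun dp j => pvDpM cost (i : Int) j dp) dp).length = K + 1 ∧
      (∀ t : Nat, t < K + 1 →
        (((PySem.List.pyRange (i : Int) (b : Int) 1).foldl
          (fun dp j => pvDpM cost (i : Int) j dp) dp).getD t []).length = N + 1) ∧
      ∀ r j : Nat, r < K + 1 → j < N + 1 →
        pvTblGet ((PySem.List.pyRange (i : Int) (b : Int) 1).foldl
            (fun dp j => pvDpM cost (i : Int) j dp) dp) (r : Int) (j : Int)
          = if r = i ∧ i ≤ j ∧ j < b then Qm (pvCLs (pvCf (K + 1) reqs) 1 i) j
            else pvTblGet dp (r : Int) (j : Int) := by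
  intro b hb1
  induction b, hb1 using Nat.le_induction with
  | base =>
    intro _
    rw [PySem.List.pyRange_one_eq_nil (by omega)]
    exact ⟨hlen, hrow, fun r j hr hj => by rw [if_neg (by omega)]; rfl⟩
  | succ b hb ih =>
    intro hb2
    obtain ⟨ihlen, ihrow, ihget⟩ := ih (by omega)
    have hcast : ((b + 1 : Nat) : Int) = (b : Int) + 1 := by push_cast; ring
    rw [hcast, PySem.List.pyRange_one_succ_right (by omega), List.foldl_append, List.foldl_cons,
      List.foldl_nil]
    set res := (PySem.List.pyRange (i : Int) (b : Int) 1).foldl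
      (fun dp j => pvDpM cost (i : Int) j dp) dp with hres
    have hchar := pvDpM_char cost res i b hi1 (by omega) (by rw [ihrow i (by omega)]; omega)
    -- the current cell still holds INF
    have hcell : pvTblGet res (i : Int) (b : Int) = pvINF := by
      rw [ihget i b (by omega) (by omega), if_neg (by omega), hget i b (by omega) (by omega),
        if_neg (by omega)]
    -- the running minimum computes the Qm recurrence
    have hbound : ((b : Int) - ((i : Int) - 1) + 1) = 1 + ((b - (i - 1) : Nat) : Int) := by omega
    have hval : (PySem.List.pyRange 1 ((b : Int) - ((i : Int) - 1) + 1) 1).foldl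
        (fun acc m => min acc (pvTblGet res ((i : Int) - 1) ((b : Int) - m)
          + pvTblGet cost (i : Int) m)) (pvTblGet res (i : Int) (b : Int))
        = Qm (pvCLs (pvCf (K + 1) reqs) 1 i) b := by
      rw [hcell, hbound, foldl_min_bridge
        (fun m => pvTblGet res ((i : Int) - 1) ((b : Int) - m) + pvTblGet cost (i : Int) m)
        (fun m => Qm (pvCLs (pvCf (K + 1) reqs) 1 (i - 1)) (b - m) + pvCf (K + 1) reqs i m)
        (b - (i - 1)) ?_, ← pvR_rec K reqs i b hi1]
      intro s hs
      show pvTblGet res ((i : Int) - 1) ((b : Int) - (1 + (s : Int)))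
            + pvTblGet cost (i : Int) (1 + (s : Int))
          = Qm (pvCLs (pvCf (K + 1) reqs) 1 (i - 1)) (b - (1 + s)) + pvCf (K + 1) reqs i (1 + s)
      have hc1 : ((i : Int) - 1) = ((i - 1 : Nat) : Int) := by omega
      have hc2 : ((b : Int) - (1 + (s : Int))) = ((b - (1 + s) : Nat) : Int) := by omega
      have hc3 : (1 + (s : Int)) = ((1 + s : Nat) : Int) := by push_cast; ring
      rw [hc1, hc2, hc3]
      rw [ihget (i - 1) (b - (1 + s)) (by omega) (by omega), if_neg (by omega),
        hget (i - 1) (b - (1 + s)) (by omega) (by omega), if_pos (by omega),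
        hcost i (1 + s) (by omega) (by omega) (by omega) (by omega)]
    rw [hchar, hval]
    refine ⟨?_, ?_, ?_⟩
    · rw [pvTblSet_length, ihlen]
    · intro t ht
      rw [pvTblSet_rowlen, ihrow t ht]
    · intro r j hr hj
      by_cases hcur : r = i ∧ j = b
      · obtain ⟨rfl, rfl⟩ := hcur
        rw [pvTblGet_set_self _ _ _ _ (by omega) (by rw [ihrow r (by omega)]; omega),
          if_pos (by omega)]
      · rw [pvTblGet_set_ne _ _ _ _ _ _ (by omega), ihget r j hr hj]
        by_cases hcond : r = i ∧ i ≤ j ∧ j < b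
        · rw [if_pos hcond, if_pos (by omega)]
        · rw [if_neg hcond, if_neg (by omega)]

-- ---- the outer i-loop ----
lemma pvDpLoop_aux (reqs : List (Int × Int × Int)) (cost : List (List Int)) (K N : Nat)
    (hcost : ∀ t m : Nat, 1 ≤ t → t ≤ K → 1 ≤ m → m ≤ N →
      pvTblGet cost (t : Int) (m : Int) = pvCf (K + 1) reqs t m)
    (dp0 : List (List Int)) (hlen0 : dp0.length = K + 1)
    (hrow0 : ∀ t : Nat, t < K + 1 → (dp0.getD t []).length = N + 1)
    (hget0 : ∀ r j : Nat, r < K + 1 → j < N + 1 →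
      pvTblGet dp0 (r : Int) (j : Int) = if r = 0 then Qm (pvCLs (pvCf (K + 1) reqs) 1 r) j else pvINF) :
    ∀ c : Nat, c ≤ K →
      ((PySem.List.pyRange 1 (1 + (c : Int)) 1).foldl
          (fun dp i => pvDpJ cost (N : Int) i dp) dp0).length = K + 1 ∧
      (∀ t : Nat, t < K + 1 →
        (((PySem.List.pyRange 1 (1 + (c : Int)) 1).foldl
          (fun dp i => pvDpJ cost (N : Int) i dp) dp0).getD t []).length = N + 1) ∧
      ∀ r j : Nat, r < K + 1 → j < N + 1 →
        pvTblGet ((PySem.List.pyRange 1 (1 + (c : Int)) 1).foldl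
            (fun dp i => pvDpJ cost (N : Int) i dp) dp0) (r : Int) (j : Int)
          = if r ≤ c then Qm (pvCLs (pvCf (K + 1) reqs) 1 r) j else pvINF := by
  intro c
  induction c with
  | zero =>
    intro _
    rw [show PySem.List.pyRange 1 (1 + ((0 : Nat) : Int)) 1 = [] from
      PySem.List.pyRange_one_eq_nil (by omega)]
    refine ⟨hlen0, hrow0, fun r j hr hj => ?_⟩
    rw [show ((List.foldl (fun dp i => pvDpJ cost (N : Int) i dp) dp0 [])) = dp0 from rfl,
      hget0 r j hr hj]
    by_cases h : r = 0
    · rw [if_pos h, if_pos (by omega)]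
    · rw [if_neg h, if_neg (by omega)]
  | succ c ihc =>
    intro hc1
    obtain ⟨ihlen, ihrow, ihget⟩ := ihc (by omega)
    have hsplit : (1 + ((c + 1 : Nat) : Int)) = (1 + (c : Int)) + 1 := by push_cast; ring
    rw [hsplit, PySem.List.pyRange_one_succ_right (by omega), List.foldl_append, List.foldl_cons,
      List.foldl_nil]
    set res := (PySem.List.pyRange 1 (1 + (c : Int)) 1).foldl
      (fun dp i => pvDpJ cost (N : Int) i dp) dp0 with hres
    have hcasti : (1 + (c : Int)) = ((c + 1 : Nat) : Int) := by push_cast; ring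
    have hcastb : ((N : Int) + 1) = ((N + 1 : Nat) : Int) := by push_cast; ring
    by_cases hcN : c + 1 ≤ N + 1
    · have hj := pvDpJ_aux reqs cost res K N (c + 1) (by omega) (by omega) hcost ihlen ihrow
        (fun r j hr hj => by rw [ihget r j hr hj]; simp only [Nat.add_sub_cancel])
        (N + 1) (by omega) (by omega)
      rw [pvDpJ, hcasti, hcastb]
      obtain ⟨jlen, jrow, jget⟩ := hj
      refine ⟨jlen, jrow, fun r j hr hj => ?_⟩
      rw [jget r j hr hj, ihget r j hr hj]
      by_cases h1 : r = c + 1 ∧ c + 1 ≤ j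
      · rw [if_pos ⟨h1.1, h1.2, hj⟩, if_pos (by omega), h1.1]
      · by_cases h2 : r ≤ c
        · rw [if_neg (by omega), if_pos h2, if_pos (by omega)]
        · by_cases h3 : r = c + 1
          · rw [if_neg (by omega), if_neg h2, if_pos (by omega), h3,
              pvR_short K reqs (c + 1) j (by omega)]
          · rw [if_neg (by omega), if_neg h2, if_neg (by omega)]
    · rw [pvDpJ, hcasti, hcastb, PySem.List.pyRange_one_eq_nil (by
        have : (N + 1 : Nat) ≤ (c + 1 : Nat) := by omega
        exact_mod_cast Nat.cast_le.2 this), List.foldl_nil]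
      refine ⟨ihlen, ihrow, fun r j hr hj => ?_⟩
      rw [ihget r j hr hj]
      by_cases h2 : r ≤ c
      · rw [if_pos h2, if_pos (by omega)]
      · by_cases h3 : r = c + 1
        · rw [if_neg h2, if_pos (by omega), h3, pvR_short K reqs (c + 1) j (by omega)]
        · rw [if_neg h2, if_neg (by omega)]

-- ---- A's DP equals the Qm recurrence on the full type list ----
lemma A_char (k n : Int) (reqs : List (Int × Int × Int)) (hk : 0 ≤ k) (hn : 0 ≤ n)
    (hreq : ∀ r ∈ reqs, -(k + 1) ≤ r.2.2 ∧ r.2.2 ≤ k) :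
    solution k n reqs = Qm (pvCLs (pvCf (k.toNat + 1) reqs) 1 k.toNat) n.toNat := by
  have hkk : k = ((k.toNat : Nat) : Int) := by omega
  have hnn : n = ((n.toNat : Nat) : Int) := by omega
  rw [solution_view, pvDpLoop, hkk, hnn, add_comm ((k.toNat : Nat) : Int) 1]
  obtain ⟨_, _, lget⟩ := pvDpLoop_aux reqs
    (pvCost ((k.toNat : Nat) : Int) ((n.toNat : Nat) : Int) reqs) k.toNat n.toNat
    (fun t m h1 h2 h3 h4 => by
      rw [pvCost_spec _ _ reqs (by omega) (by omega)
        (fun r hr => by have := hreq r hr; constructor <;> omega) t m h1 (by omega) h3 (by omega)]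
      simp only [Int.toNat_natCast])
    (pvDp0 ((k.toNat : Nat) : Int) ((n.toNat : Nat) : Int))
    (by rw [pvDp0_length _ _ (by omega)]; omega)
    (fun t ht => by rw [pvDp0_rowlen _ _ t (by omega) (by omega) (by omega)]; omega)
    (fun r j hr hj => by
      rw [pvDp0_get _ _ (by omega) (by omega) r j (by omega) (by omega)]
      by_cases hr0 : r = 0
      · subst hr0
        rw [if_pos rfl, pvR_zero]
        by_cases hj0 : j = 0
        · rw [if_pos ⟨rfl, hj0⟩, if_pos hj0]
        · rw [if_neg (by tauto), if_neg hj0]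
      · rw [if_neg (by tauto), if_neg hr0])
    k.toNat (le_refl k.toNat)
  rw [lget k.toNat n.toNat (by omega) (by omega), if_pos (le_refl k.toNat)]
  simp only [Int.toNat_natCast]

-- ---- B: min-plus convolution layer ----
lemma foldl_min_bridge0 (g : Int → Int) (g' : Nat → Int) (c : Nat)
    (hg : ∀ i : Nat, i < c → g (i : Int) = g' i) :
    (PySem.List.pyRange 0 (c : Int) 1).foldl (fun acc x => min acc (g x)) pvINF
      = bigMin ((List.range' 0 c).map g') := by
  rw [PySem.List.pyRange_one]
  have h1 : ((c : Int) - 0).toNat = c := by omega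
  rw [h1, List.foldl_map, bigMin, List.range'_eq_map_range, List.foldl_map, List.foldl_map]
  apply PySem.List.foldl_congr_mem
  intro acc s hs
  rw [List.mem_range] at hs
  have h2 : (0 : Int) + (s : Int) = ((s : Nat) : Int) := by omega
  rw [h2, Nat.zero_add, hg s hs]

lemma pvMinplusB_length (n : Nat) (u v : List Int) :
    (pvMinplusB ((n : Nat) : Int) u v).length = n + 1 := by
  rw [pvMinplusB, List.length_map, PySem.List.length_pyRange_one]
  omega

lemma pvMinplusB_get (n : Nat) (u v : List Int) (s : Nat) (hs : s ≤ n) :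
    (pvMinplusB ((n : Nat) : Int) u v).getD s 0
      = bigMin ((List.range' 0 (s + 1)).map (fun i => u.getD i 0 + v.getD (s - i) 0)) := by
  rw [pvMinplusB, show ((n : Nat) : Int) + 1 = ((n + 1 : Nat) : Int) from by push_cast; ring,
    List.getD_eq_getElem?_getD,
    PySem.List.getElem?_map_pyRange_zero _ _ _ (by omega), Option.getD_some]
  have hcast : ((s : Nat) : Int) + 1 = ((s + 1 : Nat) : Int) := by push_cast; ring
  rw [hcast, foldl_min_bridge0
    (fun x => PySem.List.pyGetD u x 0 + PySem.List.pyGetD v (((s : Nat) : Int) - x) 0)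
    (fun i => u.getD i 0 + v.getD (s - i) 0) (s + 1) ?_]
  intro i hi
  show PySem.List.pyGetD u ((i : Nat) : Int) 0
      + PySem.List.pyGetD v (((s : Nat) : Int) - ((i : Nat) : Int)) 0
    = u.getD i 0 + v.getD (s - i) 0
  have h2 : ((s : Nat) : Int) - ((i : Nat) : Int) = ((s - i : Nat) : Int) := by omega
  rw [h2, PySem.List.pyGetD_natCast, PySem.List.pyGetD_natCast]

-- a vector v "represents" the cost-list segment cs: right length, nonnegative entries,
-- and capped at INF it is the segment's optimal wait Qm cs
def SegOK (n : Nat) (cs : List (Nat → Int)) (v : List Int) : Prop :=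
  (∀ f ∈ cs, ∀ m, 0 ≤ f m) ∧ v.length = n + 1 ∧
  ∀ s : Nat, s ≤ n → 0 ≤ v.getD s 0 ∧ min (v.getD s 0) pvINF = Qm cs s

lemma pvINF_nonneg : (0 : Int) ≤ pvINF := by norm_num [pvINF]

lemma minplus_get_Qm (n : Nat) (cs ds : List (Nat → Int)) (u v : List Int)
    (hu : SegOK n cs u) (hv : SegOK n ds v) (s : Nat) (hs : s ≤ n) :
    (pvMinplusB ((n : Nat) : Int) u v).getD s 0 = Qm (cs ++ ds) s := by
  obtain ⟨hucs, hulen, huget⟩ := hu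
  obtain ⟨hvcs, hvlen, hvget⟩ := hv
  have hnn : ∀ f ∈ cs ++ ds, ∀ m, 0 ≤ f m := by
    intro f hf
    rcases List.mem_append.1 hf with h | h
    · exact hucs f h
    · exact hvcs f h
  rw [pvMinplusB_get n u v s hs, Qm_append cs ds hnn s]
  apply le_antisymm
  · apply le_bigMin (bigMin_le_INF _)
    intro x hx
    obtain ⟨i, hi, rfl⟩ := List.mem_map.1 hx
    rw [List.mem_range'_1] at hi
    obtain ⟨hun, huc⟩ := huget i (by omega)
    obtain ⟨hvn, hvc⟩ := hvget (s - i) (by omega)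
    rw [← huc, ← hvc]
    have hB := bigMin_le_INF ((List.range' 0 (s + 1)).map
      (fun i => u.getD i 0 + v.getD (s - i) 0))
    by_cases hca : u.getD i 0 ≤ pvINF
    · by_cases hcb : v.getD (s - i) 0 ≤ pvINF
      · rw [min_eq_left hca, min_eq_left hcb]
        exact bigMin_le_of_mem (List.mem_map.2 ⟨i, by rw [List.mem_range'_1]; omega, rfl⟩)
      · rw [min_eq_right (le_of_lt (not_le.1 hcb))]
        have h1 : 0 ≤ min (u.getD i 0) pvINF := le_min hun pvINF_nonneg
        omega
    · rw [min_eq_right (le_of_lt (not_le.1 hca))]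
      have h1 : 0 ≤ min (v.getD (s - i) 0) pvINF := le_min hvn pvINF_nonneg
      omega
  · apply le_bigMin (bigMin_le_INF _)
    intro x hx
    obtain ⟨i, hi, rfl⟩ := List.mem_map.1 hx
    rw [List.mem_range'_1] at hi
    obtain ⟨hun, huc⟩ := huget i (by omega)
    obtain ⟨hvn, hvc⟩ := hvget (s - i) (by omega)
    have step := bigMin_le_of_mem (List.mem_map.2 ⟨i, by rw [List.mem_range'_1]; omega, rfl⟩)
      (l := (List.range' 0 (s + 1)).map (fun i => Qm cs i + Qm ds (s - i)))
    rw [← huc, ← hvc] at step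
    have h1 := min_le_left (u.getD i 0) pvINF
    have h2 := min_le_left (v.getD (s - i) 0) pvINF
    omega

lemma minplus_SegOK (n : Nat) (cs ds : List (Nat → Int)) (u v : List Int)
    (hu : SegOK n cs u) (hv : SegOK n ds v) :
    SegOK n (cs ++ ds) (pvMinplusB ((n : Nat) : Int) u v) := by
  have hnn : ∀ f ∈ cs ++ ds, ∀ m, 0 ≤ f m := by
    intro f hf
    rcases List.mem_append.1 hf with h | h
    · exact hu.1 f h
    · exact hv.1 f h
  refine ⟨hnn, pvMinplusB_length n u v, fun s hs => ?_⟩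
  rw [minplus_get_Qm n cs ds u v hu hv s hs]
  exact ⟨Qm_nonneg _ hnn s, min_eq_left (Qm_le_INF _ _)⟩

-- ---- B: leaves ----
lemma unit_SegOK (n : Nat) : SegOK n [] ((0 : Int) :: List.replicate n pvINF) := by
  refine ⟨(by intro f hf; cases hf), (by simp), fun s hs => ?_⟩
  cases s with
  | zero =>
    refine ⟨le_refl _, ?_⟩
    show min (0 : Int) pvINF = Qm [] 0
    rw [min_eq_left pvINF_nonneg]
    rfl
  | succ s' =>
    have hget : (((0 : Int) :: List.replicate n pvINF).getD (s' + 1) 0) = pvINF := by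
      rw [List.getD_cons_succ, List.getD_eq_getElem?_getD,
        List.getElem?_replicate, if_pos (by omega)]
      rfl
    rw [hget]
    refine ⟨pvINF_nonneg, ?_⟩
    rw [min_self]
    show pvINF = Qm [] (s' + 1)
    simp [Qm]

lemma Qm_singleton (c : Nat → Int) (hc : ∀ m, 0 ≤ c m) (s : Nat) (hs : 1 ≤ s) :
    Qm [c] s = min (c s) pvINF := by
  rw [Qm_cons]
  apply le_antisymm
  · refine le_min ?_ (bigMin_le_INF _)
    have hm : (fun m => Qm ([] : List (Nat → Int)) (s - m) + c m) s
        ∈ (List.range' 1 (s - ([] : List (Nat → Int)).length)).map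
          (fun m => Qm [] (s - m) + c m) :=
      List.mem_map.2 ⟨s, by rw [List.mem_range'_1]; simp only [List.length_nil]; omega, rfl⟩
    have hmem := bigMin_le_of_mem hm
    simpa [Qm] using hmem
  · apply le_bigMin (min_le_right _ _)
    intro x hx
    obtain ⟨m, hm, rfl⟩ := List.mem_map.1 hx
    rw [List.mem_range'_1] at hm
    simp only [List.length_nil, Nat.sub_zero] at hm
    by_cases hms : m = s
    · subst hms
      have h0 : Qm ([] : List (Nat → Int)) (m - m) = 0 := by simp [Qm]
      rw [h0, zero_add]
      exact min_le_left _ _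
    · have h1 : Qm ([] : List (Nat → Int)) (s - m) = pvINF := by
        simp only [Qm]
        rw [if_neg (by omega)]
      rw [h1]
      have := hc m
      have := min_le_right (c s) pvINF
      omega

lemma pvVecB_SegOK (n L : Nat) (reqs : List (Int × Int × Int)) (t : Nat) :
    SegOK n [pvCf L reqs t] (pvVecB ((n : Nat) : Int) (pvBucketW L reqs t)) := by
  refine ⟨?_, ?_, fun s hs => ?_⟩
  · intro f hf m
    rcases List.mem_singleton.1 hf with rfl
    exact calcWaitA_nonneg _ _
  · rw [pvVecB, List.length_append, List.length_map, PySem.List.length_pyRange_one]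
    simp only [List.length_singleton]
    omega
  · cases s with
    | zero =>
      have hget : (pvVecB ((n : Nat) : Int) (pvBucketW L reqs t)).getD 0 0 = pvINF := by
        rw [pvVecB, List.singleton_append, List.getD_cons_zero]
      rw [hget]
      refine ⟨pvINF_nonneg, ?_⟩
      rw [min_self]
      show pvINF = Qm [pvCf L reqs t] 0
      rw [Qm_cons]
      simp [bigMin]
    | succ s' =>
      have hget : (pvVecB ((n : Nat) : Int) (pvBucketW L reqs t)).getD (s' + 1) 0
          = pvCf L reqs t (s' + 1) := by
        rw [pvVecB, List.singleton_append, List.getD_cons_succ, List.getD_eq_getElem?_getD,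
          List.getElem?_map, PySem.List.getElem?_pyRange_one, if_pos (by omega)]
        simp only [Option.map_some, Option.getD_some]
        rw [calcWaitB_eq_A]
        show calcWaitA _ (1 + ((s' : Nat) : Int)) = pvCf L reqs t (s' + 1)
        rw [show (1 + ((s' : Nat) : Int)) = (((s' + 1 : Nat) : Nat) : Int) from by push_cast; ring]
        rfl
      rw [hget]
      refine ⟨calcWaitA_nonneg _ _, ?_⟩
      rw [Qm_singleton (pvCf L reqs t) (fun m => calcWaitA_nonneg _ _) (s' + 1) (by omega)]

-- ---- B: the divide-and-conquer reduction ----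
lemma forall2_take {α β : Type} {R : α → β → Prop} (nn : Nat) :
    ∀ {l₁ : List α} {l₂ : List β}, List.Forall₂ R l₁ l₂ →
      List.Forall₂ R (l₁.take nn) (l₂.take nn) := by
  induction nn with
  | zero => intro l₁ l₂ _; simp [List.take]
  | succ m ih =>
    intro l₁ l₂ h
    cases h with
    | nil => simp
    | cons hr ht => simpa using List.Forall₂.cons hr (ih ht)

lemma forall2_drop {α β : Type} {R : α → β → Prop} (nn : Nat) :
    ∀ {l₁ : List α} {l₂ : List β}, List.Forall₂ R l₁ l₂ →
      List.Forall₂ R (l₁.drop nn) (l₂.drop nn) := by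
  induction nn with
  | zero => intro l₁ l₂ h; simpa using h
  | succ m ih =>
    intro l₁ l₂ h
    cases h with
    | nil => simp
    | cons hr ht => simpa using ih ht

lemma pvDcReduce_SegOK (n : Nat) :
    ∀ (fuel : Nat) (vs : List (List Int)) (css : List (List (Nat → Int))),
      vs.length ≤ fuel → vs ≠ [] → List.Forall₂ (fun cs v => SegOK n cs v) css vs →
      SegOK n css.flatten (pvDcReduce ((n : Nat) : Int) vs) := by
  intro fuel
  induction fuel with
  | zero =>
    intro vs css h hne _
    cases vs with
    | nil => exact absurd rfl hne
    | cons a l => simp at h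
  | succ N ih =>
    intro vs css hlen hne hf
    rw [pvDcReduce.eq_def]
    by_cases h1 : vs.length ≤ 1
    · rw [if_pos h1]
      obtain ⟨v, rfl⟩ : ∃ v, vs = [v] := by
        cases vs with
        | nil => exact absurd rfl hne
        | cons a l =>
          cases l with
          | nil => exact ⟨a, rfl⟩
          | cons b l' => simp at h1
      cases hf with
      | cons hr ht =>
        cases ht
        simpa using hr
    · rw [if_neg h1]
      have hm1 : 1 ≤ vs.length / 2 := by omega
      have hm2 : vs.length / 2 < vs.length := by omega
      have hlc := List.Forall₂.length_eq hf
      have hA := ih (vs.take (vs.length / 2)) (css.take (vs.length / 2))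
        (by simp only [List.length_take]; omega)
        (by
          intro hcon
          have := congrArg List.length hcon
          simp only [List.length_take, List.length_nil] at this
          omega)
        (forall2_take _ hf)
      have hB := ih (vs.drop (vs.length / 2)) (css.drop (vs.length / 2))
        (by simp only [List.length_drop]; omega)
        (by
          intro hcon
          have := congrArg List.length hcon
          simp only [List.length_drop, List.length_nil] at this
          omega)
        (forall2_drop _ hf)
      have hres := minplus_SegOK n _ _ _ _ hA hB
      rwa [← List.flatten_append, List.take_append_drop] at hres

-- the cost-list of the mapped singleton segments is the full type list
lemma pyRange_singles (L : Nat) (reqs : List (Int × Int × Int)) (K : Nat) :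
    (((PySem.List.pyRange 1 ((K : Int) + 1) 1).map (fun t => [pvCf L reqs t.toNat])).flatten)
      = pvCLs (pvCf L reqs) 1 K := by
  induction K with
  | zero =>
    rw [show ((0 : Nat) : Int) + 1 = 1 from by norm_num, PySem.List.pyRange_one_eq_nil (by omega)]
    rfl
  | succ K ih =>
    rw [show ((K + 1 : Nat) : Int) + 1 = ((K : Int) + 1) + 1 from by push_cast; ring,
      PySem.List.pyRange_one_succ_right (by omega), List.map_append, List.flatten_append, ih]
    simp only [List.map_cons, List.map_nil, List.flatten_cons, List.flatten_nil, List.append_nil]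
    rw [pvCLs_snoc, show ((K : Int) + 1).toNat = 1 + K from by omega]

lemma forall2_map_map {α β γ : Type} (R : β → γ → Prop) (f : α → β) (g : α → γ) :
    ∀ l : List α, (∀ x ∈ l, R (f x) (g x)) → List.Forall₂ R (l.map f) (l.map g) := by
  intro l
  induction l with
  | nil => intro _; simp
  | cons a l ih =>
    intro h
    simp only [List.map_cons]
    exact List.Forall₂.cons (h a (by simp)) (ih (fun x hx => h x (by simp [hx])))

lemma solution_alt_view (k n : Int) (reqs : List (Int × Int × Int)) :
    solution_alt k n reqs
      = PySem.List.pyGetD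
          (pvDcReduce n
            ([[(0 : Int)] ++ List.replicate n.toNat pvINF] ++
              (PySem.List.pyRange 1 (k + 1) 1).map (fun t => pvVecB n
                (PySem.List.pyGetD (pvByType k reqs) t []))))
          n 0 := rfl

lemma B_char (k n : Int) (reqs : List (Int × Int × Int)) (hk : 0 ≤ k) (hn : 0 ≤ n)
    (hreq : ∀ r ∈ reqs, -(k + 1) ≤ r.2.2 ∧ r.2.2 ≤ k) :
    solution_alt k n reqs = Qm (pvCLs (pvCf (k.toNat + 1) reqs) 1 k.toNat) n.toNat := by
  obtain ⟨K, rfl⟩ : ∃ K : Nat, k = ((K : Nat) : Int) := ⟨k.toNat, by omega⟩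
  obtain ⟨N, rfl⟩ : ∃ N : Nat, n = ((N : Nat) : Int) := ⟨n.toNat, by omega⟩
  rw [solution_alt_view]
  simp only [Int.toNat_natCast, List.singleton_append]
  -- the list entries are the (wrap-aware) buckets
  have hmap : (PySem.List.pyRange 1 ((K : Int) + 1) 1).map (fun t => pvVecB ((N : Nat) : Int)
        (PySem.List.pyGetD (pvByType ((K : Nat) : Int) reqs) t []))
      = (PySem.List.pyRange 1 ((K : Int) + 1) 1).map
          (fun t => pvVecB ((N : Nat) : Int) (pvBucketW (K + 1) reqs t.toNat)) := by
    apply List.map_congr_left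
    intro t ht
    rw [PySem.List.mem_pyRange_one] at ht
    obtain ⟨tn, rfl⟩ : ∃ tn : Nat, t = ((tn : Nat) : Int) := ⟨t.toNat, by omega⟩
    rw [pvByType_get K reqs (fun r hr => by have := hreq r hr; constructor <;> omega)
      tn (by omega)]
    simp only [Int.toNat_natCast]
  rw [hmap]
  -- the denoted cost segments
  have hf : List.Forall₂ (fun cs v => SegOK N cs v)
      (([] : List (Nat → Int)) :: (PySem.List.pyRange 1 ((K : Int) + 1) 1).map
        (fun t => [pvCf (K + 1) reqs t.toNat]))
      ((((0 : Int) :: List.replicate N pvINF)) ::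
        ((PySem.List.pyRange 1 ((K : Int) + 1) 1).map
          (fun t => pvVecB ((N : Nat) : Int) (pvBucketW (K + 1) reqs t.toNat)))) := by
    refine List.Forall₂.cons (unit_SegOK N) ?_
    exact forall2_map_map _ _ _ _ (fun t ht => pvVecB_SegOK N (K + 1) reqs t.toNat)
  have hflat : ((([] : List (Nat → Int)) :: (PySem.List.pyRange 1 ((K : Int) + 1) 1).map
      (fun t => [pvCf (K + 1) reqs t.toNat])).flatten) = pvCLs (pvCf (K + 1) reqs) 1 K := by
    rw [List.flatten_cons, List.nil_append, pyRange_singles]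
  by_cases hK0 : K = 0
  · subst hK0
    rw [show ((0 : Nat) : Int) + 1 = 1 from by norm_num, PySem.List.pyRange_one_eq_nil (by omega)]
    simp only [List.map_nil]
    rw [pvDcReduce.eq_def, if_pos (by simp)]
    rw [PySem.List.pyGetD_natCast]
    show ((((((0 : Int) :: List.replicate N pvINF)) :: []).headD []).getD N 0 = Qm (pvCLs (pvCf (0 + 1) reqs) 1 0) N)
    cases N with
    | zero => rfl
    | succ N' =>
      show ((((0 : Int) :: List.replicate (N' + 1) pvINF)).getD (N' + 1) 0 = Qm [] (N' + 1))
      rw [List.getD_cons_succ, List.getD_eq_getElem?_getD,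
        List.getElem?_replicate, if_pos (by omega)]
      show pvINF = Qm [] (N' + 1)
      simp [Qm]
  · -- at least one type: the root is a min-plus convolution, hence exactly Qm
    have hlenvs : ((((0 : Int) :: List.replicate N pvINF)) ::
        ((PySem.List.pyRange 1 ((K : Int) + 1) 1).map
          (fun t => pvVecB ((N : Nat) : Int) (pvBucketW (K + 1) reqs t.toNat)))).length = K + 1 := by
      simp only [List.length_cons, List.length_map, PySem.List.length_pyRange_one]
      omega
    rw [pvDcReduce.eq_def, if_neg (by rw [hlenvs]; omega)]
    rw [PySem.List.pyGetD_natCast]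
    have hA := pvDcReduce_SegOK N
      (((((0 : Int) :: List.replicate N pvINF)) ::
        ((PySem.List.pyRange 1 ((K : Int) + 1) 1).map
          (fun t => pvVecB ((N : Nat) : Int) (pvBucketW (K + 1) reqs t.toNat)))).take
        (((((0 : Int) :: List.replicate N pvINF)) ::
          ((PySem.List.pyRange 1 ((K : Int) + 1) 1).map
            (fun t => pvVecB ((N : Nat) : Int) (pvBucketW (K + 1) reqs t.toNat)))).length / 2)).length
      _ _ (le_refl _)
      (by
        intro hcon
        have := congrArg List.length hcon
        simp only [List.length_take, List.length_nil, hlenvs] at this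
        omega)
      (forall2_take _ hf)
    have hB := pvDcReduce_SegOK N
      (((((0 : Int) :: List.replicate N pvINF)) ::
        ((PySem.List.pyRange 1 ((K : Int) + 1) 1).map
          (fun t => pvVecB ((N : Nat) : Int) (pvBucketW (K + 1) reqs t.toNat)))).drop
        (((((0 : Int) :: List.replicate N pvINF)) ::
          ((PySem.List.pyRange 1 ((K : Int) + 1) 1).map
            (fun t => pvVecB ((N : Nat) : Int) (pvBucketW (K + 1) reqs t.toNat)))).length / 2)).length
      _ _ (le_refl _)
      (by
        intro hcon
        have := congrArg List.length hcon
        simp only [List.length_drop, List.length_nil, hlenvs] at this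
        omega)
      (forall2_drop _ hf)
    have hval := minplus_get_Qm N _ _ _ _ hA hB N (le_refl N)
    rw [← List.flatten_append, List.take_append_drop, hflat] at hval
    exact hval

-- ===== VERDICT (by name: the statement is the Claim_ definition above) =====
theorem solution_spec : Claim_equal_solution := by
  intro k n reqs _ hpre
  obtain ⟨hk, hn, hreq⟩ := hpre
  show solution k n reqs = solution_alt k n reqs
  rw [A_char k n reqs hk hn hreq, B_char k n reqs hk hn hreq]
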